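-- pv_equiv track=rewrite | github.com/mjogodnik22/Seating-Configuration | engine.py | seatOkay
-- ===== SOURCE A (Python) =====
-- def blockedSeats(x,y,xBuffer,yBuffer,diagonalBuffer):
--     bufferSeats = [] # a list that will store the seats that cannot be filled to account for a buffer around the seat at [x,y]
--     for xi in range(x-xBuffer,x+xBuffer+1):
--         if x != xi:
--             bufferSeats.append([xi,y]) # append all seats too close in the x plane
--     for yi in range(y-yBuffer,y+yBuffer+1):
--         if y != yi:
--             bufferSeats.append([x,yi]) # append all seats too close in the y plane
--     for di in range(-diagonalBuffer,diagonalBuffer+1):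
--         if di != 0:
--             bufferSeats.append([x-di,y+di])
--             bufferSeats.append([di+x,di+y]) # append all seats too close diagonally
--     return bufferSeats
--
-- def seatOkay(x,y,xBuffer,yBuffer,diagonalBuffer,seatingArea):
--     seatsToCheck = blockedSeats(x,y,xBuffer,yBuffer,diagonalBuffer) # blockedSeats returns a list of seats that cannot be filled to ensure spacing
--     for seat in seatsToCheck:
--         seatXCoord = seat[0]
--         seatYCoord = seat[1]
--         yBound = len(seatingArea)
--         if seatYCoord < 0 or seatYCoord >= yBound:
--             continue # this seat is out of the grid so it is okay to not account it as buffer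
--         xBound = len(seatingArea[seatYCoord])
--         if seatXCoord < 0 or seatXCoord >= xBound:
--             continue # this seat is out of the grid so it is okay to not account it as buffer
--         elif seatingArea[seatYCoord][seatXCoord] == 1:
--             return False # one of our seats we would need to block to fill [x,y] is filled, therefore, [x,y] cannot be filled
--     return True # since we have gone through all of our seats that would need to be blocked off and none are already filled, [x,y] can be filled
-- ===== SOURCE B (Python) =====
-- def seatOkay(x, y, xBuffer, yBuffer, diagonalBuffer, seatingArea):
--     # Scan the grid once: a filled seat blocks (x, y) iff it lies on the same row,
--     # same column or a diagonal of (x, y) within the corresponding buffer distance.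
--     for cy, row in enumerate(seatingArea):
--         for cx, cell in enumerate(row):
--             if cell == 1:
--                 dx = cx - x
--                 dy = cy - y
--                 if ((dy == 0 and dx != 0 and abs(dx) <= xBuffer)
--                         or (dx == 0 and dy != 0 and abs(dy) <= yBuffer)
--                         or (abs(dx) == abs(dy) and dy != 0 and abs(dy) <= diagonalBuffer)):
--                     return False
--     return True
-- ===== Notes on version B (the rewrite author's own statement) =====
-- stated objective: alternative
-- what changed: Inverts the traversal: instead of enumerating the buffer's candidate cells around (x,y) and probing the grid at each, B scans the seating grid once and classifies each occupied cell by its displacement (dx,dy) from (x,y) (same row, same column, or |dx|==|dy| diagonal within the respective buffer), returning False on the first blocking occupant; no candidate list and no per-candidate bounds checks exist.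
import Mathlib
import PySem

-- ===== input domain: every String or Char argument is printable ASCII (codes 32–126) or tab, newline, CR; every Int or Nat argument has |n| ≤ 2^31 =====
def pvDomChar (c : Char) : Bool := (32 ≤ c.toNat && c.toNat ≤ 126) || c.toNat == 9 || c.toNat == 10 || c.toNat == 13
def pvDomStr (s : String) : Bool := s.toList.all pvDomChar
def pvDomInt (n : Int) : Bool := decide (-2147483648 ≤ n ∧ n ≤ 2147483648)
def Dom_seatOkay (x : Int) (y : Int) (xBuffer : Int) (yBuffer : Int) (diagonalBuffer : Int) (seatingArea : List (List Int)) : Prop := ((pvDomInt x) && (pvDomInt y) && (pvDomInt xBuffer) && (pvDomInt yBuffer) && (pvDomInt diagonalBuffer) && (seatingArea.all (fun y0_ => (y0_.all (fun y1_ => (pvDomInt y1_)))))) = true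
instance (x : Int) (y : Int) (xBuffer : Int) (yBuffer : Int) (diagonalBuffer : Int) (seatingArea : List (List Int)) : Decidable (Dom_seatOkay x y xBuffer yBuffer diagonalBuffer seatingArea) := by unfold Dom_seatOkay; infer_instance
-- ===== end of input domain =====

-- B inverts the traversal: instead of enumerating buffer candidate cells and probing the
-- grid, it scans the grid once and classifies each occupied cell by its displacement from
-- (x, y) (objective: alternative).

-- ===== PORT A =====
def blockedSeats (x y xBuffer yBuffer diagonalBuffer : Int) : List (Int × Int) :=
  (PySem.List.pyRange (-diagonalBuffer) (diagonalBuffer + 1) 1).foldl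
    (fun acc di => if di ≠ 0 then acc ++ [(x - di, y + di), (di + x, di + y)] else acc)
    ((PySem.List.pyRange (y - yBuffer) (y + yBuffer + 1) 1).foldl
      (fun acc yi => if y ≠ yi then acc ++ [(x, yi)] else acc)
      ((PySem.List.pyRange (x - xBuffer) (x + xBuffer + 1) 1).foldl
        (fun acc xi => if x ≠ xi then acc ++ [(xi, y)] else acc) []))

-- the 'for seat in seatsToCheck' loop of A, with 'continue'/'return False' as recursion
def seatScanA (seatingArea : List (List Int)) : List (Int × Int) → Bool
  | [] => true
  | seat :: rest =>
    let seatXCoord := seat.1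
    let seatYCoord := seat.2
    let yBound : Int := seatingArea.length
    if seatYCoord < 0 ∨ seatYCoord ≥ yBound then seatScanA seatingArea rest
    else
      let row := (PySem.List.pyGet? seatingArea seatYCoord).getD []
      let xBound : Int := row.length
      if seatXCoord < 0 ∨ seatXCoord ≥ xBound then seatScanA seatingArea rest
      else if (PySem.List.pyGet? row seatXCoord).getD 0 == 1 then false
      else seatScanA seatingArea rest

def seatOkay (x : Int) (y : Int) (xBuffer : Int) (yBuffer : Int) (diagonalBuffer : Int) (seatingArea : List (List Int)) : Bool :=
  seatScanA seatingArea (blockedSeats x y xBuffer yBuffer diagonalBuffer)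

-- ===== PORT B =====
-- B's displacement test: does an occupied cell at (cx, cy) block (x, y)?
def conflictsB (x y xBuffer yBuffer diagonalBuffer cx cy : Int) : Bool :=
  let dx := cx - x
  let dy := cy - y
  (decide (dy = 0) && decide (dx ≠ 0) && decide (|dx| ≤ xBuffer)) ||
  (decide (dx = 0) && decide (dy ≠ 0) && decide (|dy| ≤ yBuffer)) ||
  (decide (|dx| = |dy|) && decide (dy ≠ 0) && decide (|dy| ≤ diagonalBuffer))

def seatOkay_alt (x : Int) (y : Int) (xBuffer : Int) (yBuffer : Int) (diagonalBuffer : Int) (seatingArea : List (List Int)) : Bool :=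
  !((PySem.List.enumerate seatingArea 0).any (fun rowp =>
      (PySem.List.enumerate rowp.2 0).any (fun cellp =>
        cellp.2 == 1 && conflictsB x y xBuffer yBuffer diagonalBuffer cellp.1 rowp.1)))

-- ===== PRECONDITION & SPEC =====
def Spec_seatOkay (x : Int) (y : Int) (xBuffer : Int) (yBuffer : Int) (diagonalBuffer : Int) (seatingArea : List (List Int)) (out : Bool) : Prop := out = seatOkay_alt x y xBuffer yBuffer diagonalBuffer seatingArea
instance (x : Int) (y : Int) (xBuffer : Int) (yBuffer : Int) (diagonalBuffer : Int) (seatingArea : List (List Int)) (out : Bool) : Decidable (Spec_seatOkay x y xBuffer yBuffer diagonalBuffer seatingArea out) := by unfold Spec_seatOkay; infer_instance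

-- ===== CLAIM (what is proved, stated in full; the proofs are below) =====
def Claim_equal_seatOkay : Prop := ∀ (x : Int) (y : Int) (xBuffer : Int) (yBuffer : Int) (diagonalBuffer : Int) (seatingArea : List (List Int)), Dom_seatOkay x y xBuffer yBuffer diagonalBuffer seatingArea → Spec_seatOkay x y xBuffer yBuffer diagonalBuffer seatingArea (seatOkay x y xBuffer yBuffer diagonalBuffer seatingArea)

-- ===== LEMMAS AND PROOFS =====

-- 'this cell is in the grid and holds a 1', as a Prop over Nat coordinates
def OccP (sa : List (List Int)) (cx cy : Int) : Prop :=
  ∃ (k : Nat) (hk : k < sa.length) (j : Nat) (hj : j < (sa[k]'hk).length),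
    cy = (k : Int) ∧ cx = (j : Int) ∧ ((sa[k]'hk)[j]'hj) = 1

-- A's bounds-checked occupancy test (as in its scan body), packaged
def occupiedB (sa : List (List Int)) (cx cy : Int) : Bool :=
  decide (0 ≤ cy ∧ cy < (sa.length : Int)) &&
  (let row := (PySem.List.pyGet? sa cy).getD []
   (decide (0 ≤ cx ∧ cx < (row.length : Int)) &&
    ((PySem.List.pyGet? row cx).getD 0 == 1)))

theorem get_getD {α : Type} (xs : List α) (i : Int) (d : α)
    (h0 : 0 ≤ i) (h1 : i < (xs.length : Int)) :
    (PySem.List.pyGet? xs i).getD d = xs[i.toNat]'(by omega) := by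
  rw [show (PySem.List.pyGet? xs i).getD d = PySem.List.pyGetD xs i d from rfl,
      PySem.List.pyGetD_eq_getElem xs d h0 h1]

theorem occupiedB_iff (sa : List (List Int)) (cx cy : Int) :
    occupiedB sa cx cy = true ↔ OccP sa cx cy := by
  constructor
  · intro h
    simp only [occupiedB, Bool.and_eq_true, decide_eq_true_eq, beq_iff_eq] at h
    obtain ⟨⟨hy0, hy1⟩, ⟨hx0, hx1⟩, hcell⟩ := h
    rw [get_getD sa cy [] hy0 hy1] at hx1 hcell
    rw [get_getD _ cx 0 hx0 hx1] at hcell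
    exact ⟨cy.toNat, by omega, cx.toNat, by omega, by omega, by omega, hcell⟩
  · rintro ⟨k, hk, j, hj, rfl, rfl, hcell⟩
    simp only [occupiedB, Bool.and_eq_true, decide_eq_true_eq, beq_iff_eq]
    have hkc : ((k : Int) : Int) < (sa.length : Int) := by exact_mod_cast hk
    refine ⟨⟨by omega, hkc⟩, ?_⟩
    rw [get_getD sa (k : Int) [] (by omega) hkc]
    have hrow : sa[((k : Int)).toNat]'(by omega) = sa[k]'hk := by simp
    rw [hrow]
    have hjc : (j : Int) < ((sa[k]'hk).length : Int) := by exact_mod_cast hj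
    refine ⟨⟨by omega, hjc⟩, ?_⟩
    rw [get_getD _ (j : Int) 0 (by omega) hjc]
    simpa using hcell

-- A's scan returns true iff no listed seat passes its in-grid occupancy test
theorem seatScanA_eq_not_any (sa : List (List Int)) (l : List (Int × Int)) :
    seatScanA sa l = !(l.any (fun s => occupiedB sa s.1 s.2)) := by
  induction l with
  | nil => simp [seatScanA]
  | cons s rest ih =>
    obtain ⟨sx, sy⟩ := s
    simp only [seatScanA]
    by_cases hy : sy < 0 ∨ sy ≥ (sa.length : Int)
    · have hocc : occupiedB sa sx sy = false := by
        simp only [occupiedB, Bool.and_eq_false_iff, decide_eq_false_iff_not]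
        left; omega
      rw [if_pos hy, ih]; simp [hocc]
    · rw [if_neg hy]
      have hy' : 0 ≤ sy ∧ sy < (sa.length : Int) := by omega
      by_cases hx : sx < 0 ∨ sx ≥ (((PySem.List.pyGet? sa sy).getD []).length : Int)
      · have hocc : occupiedB sa sx sy = false := by
          simp only [occupiedB, Bool.and_eq_false_iff, decide_eq_false_iff_not]
          right; left; omega
        rw [if_pos hx, ih]; simp [hocc]
      · rw [if_neg hx]
        have hx' : 0 ≤ sx ∧ sx < (((PySem.List.pyGet? sa sy).getD []).length : Int) := by omega
        by_cases hc : ((PySem.List.pyGet? ((PySem.List.pyGet? sa sy).getD []) sx).getD 0 == 1) = true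
        · have hocc : occupiedB sa sx sy = true := by
            simp only [occupiedB]
            rw [hc]
            rw [get_getD sa sy [] hy'.1 hy'.2] at hx'
            simp [hy', hx']
          rw [if_pos hc]; simp [hocc]
        · have hocc : occupiedB sa sx sy = false := by
            simp only [occupiedB, Bool.and_eq_false_iff]
            right; right; simpa using hc
          rw [if_neg hc, ih]; simp [hocc]

-- the common semantic content: some occupied cell blocks (x, y)
def BlockedP (x y xBuffer yBuffer diagonalBuffer : Int) (sa : List (List Int)) : Prop :=
  ∃ (k : Nat) (hk : k < sa.length) (j : Nat) (hj : j < (sa[k]'hk).length),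
    ((sa[k]'hk)[j]'hj) = 1 ∧
    (((k : Int) = y ∧ (j : Int) ≠ x ∧ |(j : Int) - x| ≤ xBuffer) ∨
     ((j : Int) = x ∧ (k : Int) ≠ y ∧ |(k : Int) - y| ≤ yBuffer) ∨
     (|(j : Int) - x| = |(k : Int) - y| ∧ (k : Int) ≠ y ∧ |(k : Int) - y| ≤ diagonalBuffer))

-- B side: the grid scan finds a blocker iff BlockedP
theorem alt_any_iff (x y xBuffer yBuffer diagonalBuffer : Int) (sa : List (List Int)) :
    ((PySem.List.enumerate sa 0).any (fun rowp =>
      (PySem.List.enumerate rowp.2 0).any (fun cellp =>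
        cellp.2 == 1 && conflictsB x y xBuffer yBuffer diagonalBuffer cellp.1 rowp.1))) = true
    ↔ BlockedP x y xBuffer yBuffer diagonalBuffer sa := by
  rw [List.any_eq_true]
  constructor
  · rintro ⟨rowp, hmem, hany⟩
    rw [PySem.List.mem_enumerate_iff] at hmem
    obtain ⟨k, hk, rfl⟩ := hmem
    rw [List.any_eq_true] at hany
    obtain ⟨cellp, hcmem, hc⟩ := hany
    rw [PySem.List.mem_enumerate_iff] at hcmem
    obtain ⟨j, hj, rfl⟩ := hcmem
    simp only [Bool.and_eq_true, beq_iff_eq] at hc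
    obtain ⟨hcell, hconf⟩ := hc
    simp only [conflictsB, Bool.or_eq_true, Bool.and_eq_true, decide_eq_true_eq,
               zero_add] at hconf
    refine ⟨k, hk, j, hj, hcell, ?_⟩
    rcases hconf with (⟨⟨h1, h2⟩, h3⟩ | ⟨⟨h1, h2⟩, h3⟩) | ⟨⟨h1, h2⟩, h3⟩
    · exact Or.inl ⟨by omega, by omega, h3⟩
    · exact Or.inr (Or.inl ⟨by omega, by omega, h3⟩)
    · exact Or.inr (Or.inr ⟨h1, by omega, h3⟩)
  · rintro ⟨k, hk, j, hj, hcell, hcond⟩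
    refine ⟨((k : Int), sa[k]'hk), ?_, ?_⟩
    · rw [PySem.List.mem_enumerate_iff]; exact ⟨k, hk, by simp⟩
    · rw [List.any_eq_true]
      refine ⟨((j : Int), (sa[k]'hk)[j]'hj), ?_, ?_⟩
      · rw [PySem.List.mem_enumerate_iff]; exact ⟨j, hj, by simp⟩
      · simp only [Bool.and_eq_true, beq_iff_eq]
        refine ⟨hcell, ?_⟩
        simp only [conflictsB, Bool.or_eq_true, Bool.and_eq_true, decide_eq_true_eq]
        rcases hcond with ⟨h1, h2, h3⟩ | ⟨h1, h2, h3⟩ | ⟨h1, h2, h3⟩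
        · exact Or.inl (Or.inl ⟨⟨by omega, by omega⟩, h3⟩)
        · exact Or.inl (Or.inr ⟨⟨by omega, by omega⟩, h3⟩)
        · exact Or.inr ⟨⟨h1, by omega⟩, h3⟩

-- any over an append-accumulating foldl
theorem any_foldl_append {α β : Type} (g : β → List α) (p : α → Bool)
    (l : List β) (init : List α) :
    ((l.foldl (fun acc b => acc ++ g b) init).any p)
      = (init.any p || l.any (fun b => (g b).any p)) := by
  rw [PySem.List.foldl_append_eq_flatMap]
  simp

theorem any_if_one {α : Type} (c : Prop) [Decidable c] (a : α) (p : α → Bool) :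
    ((if c then [a] else []).any p) = (decide c && p a) := by
  by_cases h : c <;> simp [h]

theorem any_if_two {α : Type} (c : Prop) [Decidable c] (a b : α) (p : α → Bool) :
    ((if c then [a, b] else []).any p) = (decide c && (p a || p b)) := by
  by_cases h : c <;> simp [h]

-- A side: the candidate scan finds a blocker iff BlockedP
theorem a_any_iff (x y xBuffer yBuffer diagonalBuffer : Int) (sa : List (List Int)) :
    ((blockedSeats x y xBuffer yBuffer diagonalBuffer).any
       (fun s => occupiedB sa s.1 s.2)) = true
    ↔ BlockedP x y xBuffer yBuffer diagonalBuffer sa := by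
  unfold blockedSeats
  have step1 : ∀ (l : List Int) (init : List (Int × Int)) (z : Int) (f : Int → Int × Int),
      l.foldl (fun acc t => if z ≠ t then acc ++ [f t] else acc) init
        = l.foldl (fun acc t => acc ++ (if z ≠ t then [f t] else [])) init := by
    intro l init z f
    apply PySem.List.foldl_congr_mem
    intro acc t _
    by_cases h : z ≠ t <;> simp [h]
  have step2 : ∀ (l : List Int) (init : List (Int × Int)) (g : Int → List (Int × Int)),
      l.foldl (fun acc t => if t ≠ 0 then acc ++ g t else acc) init
        = l.foldl (fun acc t => acc ++ (if t ≠ 0 then g t else [])) init := by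
    intro l init g
    apply PySem.List.foldl_congr_mem
    intro acc t _
    by_cases h : t ≠ 0 <;> simp [h]
  rw [step2, step1, step1, any_foldl_append, any_foldl_append, any_foldl_append]
  simp only [List.any_nil, Bool.false_or, any_if_one, any_if_two]
  simp only [Bool.or_eq_true, List.any_eq_true, PySem.List.mem_pyRange_one,
             Bool.and_eq_true, decide_eq_true_eq]
  constructor
  · rintro ((⟨xi, ⟨hlo, hhi⟩, hne, hocc⟩ | ⟨yi, ⟨hlo, hhi⟩, hne, hocc⟩) |
            ⟨di, ⟨hlo, hhi⟩, hne, (hocc | hocc)⟩)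
    · obtain ⟨k, hk, j, hj, h1, h2, h3⟩ := (occupiedB_iff sa xi y).mp hocc
      exact ⟨k, hk, j, hj, h3,
        Or.inl ⟨by omega, by omega, abs_le.mpr ⟨by omega, by omega⟩⟩⟩
    · obtain ⟨k, hk, j, hj, h1, h2, h3⟩ := (occupiedB_iff sa x yi).mp hocc
      exact ⟨k, hk, j, hj, h3,
        Or.inr (Or.inl ⟨by omega, by omega, abs_le.mpr ⟨by omega, by omega⟩⟩)⟩
    · obtain ⟨k, hk, j, hj, h1, h2, h3⟩ := (occupiedB_iff sa (x - di) (y + di)).mp hocc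
      refine ⟨k, hk, j, hj, h3, Or.inr (Or.inr ⟨?_, by omega, abs_le.mpr ⟨by omega, by omega⟩⟩)⟩
      exact abs_eq_abs.mpr (Or.inr (by omega))
    · obtain ⟨k, hk, j, hj, h1, h2, h3⟩ := (occupiedB_iff sa (di + x) (di + y)).mp hocc
      refine ⟨k, hk, j, hj, h3, Or.inr (Or.inr ⟨?_, by omega, abs_le.mpr ⟨by omega, by omega⟩⟩)⟩
      exact abs_eq_abs.mpr (Or.inl (by omega))
  · rintro ⟨k, hk, j, hj, hcell, hcond⟩
    have hocc : ∀ cx cy : Int, cy = (k : Int) → cx = (j : Int) →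
        occupiedB sa cx cy = true := by
      intro cx cy h1 h2
      rw [occupiedB_iff]
      exact ⟨k, hk, j, hj, h1, h2, hcell⟩
    rcases hcond with ⟨h1, h2, h3⟩ | ⟨h1, h2, h3⟩ | ⟨h1, h2, h3⟩
    · obtain ⟨hb1, hb2⟩ := abs_le.mp h3
      exact Or.inl (Or.inl ⟨(j : Int), ⟨by omega, by omega⟩, by omega,
        hocc (j : Int) y (by omega) rfl⟩)
    · obtain ⟨hb1, hb2⟩ := abs_le.mp h3
      exact Or.inl (Or.inr ⟨(k : Int), ⟨by omega, by omega⟩, by omega,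
        hocc x (k : Int) rfl (by omega)⟩)
    · obtain ⟨hb1, hb2⟩ := abs_le.mp h3
      have hd := abs_eq_abs.mp h1
      refine Or.inr ⟨(k : Int) - y, ⟨by omega, by omega⟩, by omega, ?_⟩
      rcases hd with hd | hd
      · exact Or.inr (hocc ((k : Int) - y + x) ((k : Int) - y + y) (by omega) (by omega))
      · exact Or.inl (hocc (x - ((k : Int) - y)) (y + ((k : Int) - y)) (by omega) (by omega))

theorem seatOkay_eq (x y xBuffer yBuffer diagonalBuffer : Int) (sa : List (List Int)) :
    seatOkay x y xBuffer yBuffer diagonalBuffer sa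
      = seatOkay_alt x y xBuffer yBuffer diagonalBuffer sa := by
  unfold seatOkay seatOkay_alt
  rw [seatScanA_eq_not_any]
  congr 1
  rw [Bool.eq_iff_iff, a_any_iff, alt_any_iff]

-- ===== VERDICT (by name: the statement is the Claim_ definition above) =====
theorem seatOkay_spec : Claim_equal_seatOkay := by
  intro x y xb yb db sa _
  exact seatOkay_eq x y xb yb db sa
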